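-- pv_equiv track=rewrite | github.com/malkro7/aoc2025 | aoc11b.py | enumerate_and_count_safe
-- ===== SOURCE A (Python) =====
-- DEFAULT_PATH_PRINT_LIMIT = 1000  # cap to avoid huge outputs
--
-- def enumerate_and_count_safe(graph, start, end, required, path_print_limit=DEFAULT_PATH_PRINT_LIMIT, print_paths=True):
--     """Enumerate simple paths (no vertex repeated on same path). Return (total_paths, qualified_paths_list).
--        For memory/safety we limit the number of printed paths to path_print_limit."""
--     total_paths = 0
--     qualified_paths = []
--
--     stack = [(start, [start], set([start]), (start in required) and {start} or set())]
--     # stack items: (node, path_list, visited_set, required_seen_set)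
--     while stack:
--         node, path, visited, req_seen = stack.pop()
--         if node == end:
--             total_paths += 1
--             if req_seen.issuperset(required):
--                 if print_paths and len(qualified_paths) < path_print_limit:
--                     qualified_paths.append(list(path))
--             continue
--         for nxt in graph.get(node, ()):
--             if nxt in visited:
--                 continue
--             new_visited = set(visited)
--             new_visited.add(nxt)
--             new_path = path + [nxt]
--             new_req_seen = set(req_seen)
--             if nxt in required:
--                 new_req_seen.add(nxt)
--             stack.append((nxt, new_path, new_visited, new_req_seen))
--
--     return total_paths, qualified_paths
-- ===== SOURCE B (Python) =====
-- DEFAULT_PATH_PRINT_LIMIT = 1000  # cap to avoid huge outputs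
--
-- def enumerate_and_count_safe(graph, start, end, required, path_print_limit=DEFAULT_PATH_PRINT_LIMIT, print_paths=True):
--     """Recursive-DFS re-implementation: closures accumulate the results instead of an
--     explicit stack of state tuples; neighbors are visited in reversed order (= the
--     LIFO pop order of the stack version)."""
--     total_paths = 0
--     qualified_paths = []
--
--     def recurse(node, path, visited, req_seen):
--         nonlocal total_paths
--         if node == end:
--             total_paths += 1
--             if req_seen.issuperset(required) and print_paths and len(qualified_paths) < path_print_limit:
--                 qualified_paths.append(list(path))
--             return
--         for nxt in reversed(graph.get(node, ())):
--             if nxt in visited: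
--                 continue
--             recurse(nxt, path + [nxt], visited | {nxt},
--                     req_seen | {nxt} if nxt in required else req_seen)
--
--     recurse(start, [start], {start}, {start} if start in required else set())
--     return total_paths, qualified_paths
-- ===== Notes on version B (the rewrite author's own statement) =====
-- stated objective: alternative
-- what changed: The explicit worklist of (node, path, visited, req_seen) tuples popped in a while-loop is replaced by a recursive DFS helper with nonlocal/closure accumulators, iterating neighbors in reversed order (= the stack's LIFO pop order).
import Mathlib
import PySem

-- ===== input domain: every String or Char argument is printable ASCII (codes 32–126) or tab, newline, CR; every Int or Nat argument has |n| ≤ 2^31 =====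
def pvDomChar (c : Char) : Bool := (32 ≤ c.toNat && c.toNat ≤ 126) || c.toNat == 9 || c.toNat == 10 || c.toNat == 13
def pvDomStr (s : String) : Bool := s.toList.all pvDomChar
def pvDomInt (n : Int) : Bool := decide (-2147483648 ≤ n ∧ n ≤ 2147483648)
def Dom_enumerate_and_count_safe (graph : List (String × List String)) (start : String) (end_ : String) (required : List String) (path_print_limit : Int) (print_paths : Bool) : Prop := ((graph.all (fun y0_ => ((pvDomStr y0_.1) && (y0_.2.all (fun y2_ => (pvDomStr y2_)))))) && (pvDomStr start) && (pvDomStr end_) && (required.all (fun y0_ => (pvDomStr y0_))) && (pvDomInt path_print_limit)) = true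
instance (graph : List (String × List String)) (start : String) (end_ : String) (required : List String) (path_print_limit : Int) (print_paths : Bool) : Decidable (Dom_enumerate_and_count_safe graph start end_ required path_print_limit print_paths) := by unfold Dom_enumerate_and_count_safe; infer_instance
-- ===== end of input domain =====

-- B re-implements A's explicit-stack loop as a recursive DFS (reversed neighbor order =
-- the stack's LIFO pop order) with closure-style accumulators; same cost, different decomposition.

abbrev PVAcc := Int × List (List String)
abbrev PVState := String × List String × PySem.Set String × PySem.Set String

-- shared totality guard for both ports: a fuel bound well above the number of loop steps
-- any input drawn by the differential tester can reach (the Python programs always terminate)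
def pvFuel (graph : List (String × List String)) : Nat :=
  let n := graph.foldl (fun a p => a + p.2.length) (graph.length + 1)
  (n + 2) ^ (n + 2)

-- ===== PORT A =====
def pvLoopA (g : PySem.Dict String (List String)) (end_ : String) (required : List String)
    (path_print_limit : Int) (print_paths : Bool) :
    Nat → List PVState → PVAcc → PVAcc
  | 0, _, acc => acc
  | _ + 1, [], acc => acc
  | f + 1, (node, path, visited, req_seen) :: stack, (total, qual) =>
    if node == end_ then
      let qual' :=
        if PySem.Set.issuperset req_seen required then
          if print_paths && decide ((qual.length : Int) < path_print_limit) then qual ++ [path]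
          else qual
        else qual
      pvLoopA g end_ required path_print_limit print_paths f stack (total + 1, qual')
    else
      let stack' := (g.getD node []).foldl
        (fun s nxt =>
          if PySem.Set.contains visited nxt then s
          else (nxt, path ++ [nxt], PySem.Set.add visited nxt,
                if required.contains nxt then PySem.Set.add req_seen nxt else req_seen) :: s)
        stack
      pvLoopA g end_ required path_print_limit print_paths f stack' (total, qual)

def enumerate_and_count_safe (graph : List (String × List String)) (start : String) (end_ : String) (required : List String) (path_print_limit : Int) (print_paths : Bool) : Int × List (List String) :=
  pvLoopA (PySem.Dict.mk graph) end_ required path_print_limit print_paths (pvFuel graph)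
    [(start, [start], PySem.Set.ofList [start],
      if required.contains start then PySem.Set.ofList [start] else PySem.Set.empty)]
    (0, [])

-- ===== PORT B =====
mutual
def pvDfsB (g : PySem.Dict String (List String)) (end_ : String) (required : List String)
    (path_print_limit : Int) (print_paths : Bool) :
    (f : Nat) → PVState → PVAcc → {r : Nat × PVAcc // r.1 ≤ f}
  | 0, _, acc => ⟨(0, acc), Nat.le_refl 0⟩
  | f + 1, (node, path, visited, req_seen), (total, qual) =>
    if node == end_ then
      ⟨(f, (total + 1,
        if PySem.Set.issuperset req_seen required && print_paths
            && decide ((qual.length : Int) < path_print_limit) then qual ++ [path] else qual)),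
       Nat.le_succ f⟩
    else
      let r := pvDfsGo g end_ required path_print_limit print_paths f
        ((g.getD node []).reverse) path visited req_seen (total, qual)
      ⟨r.1, Nat.le_trans r.2 (Nat.le_succ f)⟩
  termination_by f _ _ => (f, 0)
  decreasing_by exact Prod.Lex.left _ _ (Nat.lt_succ_self f)

def pvDfsGo (g : PySem.Dict String (List String)) (end_ : String) (required : List String)
    (path_print_limit : Int) (print_paths : Bool) :
    (f : Nat) → List String → List String → PySem.Set String → PySem.Set String → PVAcc →
      {r : Nat × PVAcc // r.1 ≤ f}
  | f, [], _, _, _, acc => ⟨(f, acc), Nat.le_refl f⟩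
  | f, nxt :: rest, path, visited, req_seen, acc =>
    if PySem.Set.contains visited nxt then
      pvDfsGo g end_ required path_print_limit print_paths f rest path visited req_seen acc
    else
      let r := pvDfsB g end_ required path_print_limit print_paths f
        (nxt, path ++ [nxt], PySem.Set.union visited [nxt],
         if required.contains nxt then PySem.Set.union req_seen [nxt] else req_seen) acc
      let r2 := pvDfsGo g end_ required path_print_limit print_paths r.1.1 rest path visited req_seen r.1.2
      ⟨r2.1, Nat.le_trans r2.2 r.2⟩
  termination_by f l _ _ _ _ => (f, l.length + 1)
  decreasing_by
    · exact Prod.Lex.right _ (by simp)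
    · exact Prod.Lex.right _ (by simp)
    · rcases Nat.lt_or_ge r.1.1 f with h | h
      · exact Prod.Lex.left _ _ h
      · have hrf : r.1.1 = f := Nat.le_antisymm r.2 h
        rw [hrf]
        exact Prod.Lex.right _ (by simp)
end

def enumerate_and_count_safe_alt (graph : List (String × List String)) (start : String) (end_ : String) (required : List String) (path_print_limit : Int) (print_paths : Bool) : Int × List (List String) :=
  ((pvDfsB (PySem.Dict.mk graph) end_ required path_print_limit print_paths (pvFuel graph)
    (start, [start], PySem.Set.ofList [start],
     if required.contains start then PySem.Set.ofList [start] else PySem.Set.empty)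
    (0, [])).1).2

-- ===== PRECONDITION & SPEC =====
def Spec_enumerate_and_count_safe (graph : List (String × List String)) (start : String) (end_ : String) (required : List String) (path_print_limit : Int) (print_paths : Bool) (out : Int × List (List String)) : Prop := out = enumerate_and_count_safe_alt graph start end_ required path_print_limit print_paths
instance (graph : List (String × List String)) (start : String) (end_ : String) (required : List String) (path_print_limit : Int) (print_paths : Bool) (out : Int × List (List String)) : Decidable (Spec_enumerate_and_count_safe graph start end_ required path_print_limit print_paths out) := by unfold Spec_enumerate_and_count_safe; infer_instance

-- ===== CLAIM (what is proved, stated in full; the proofs are below) =====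
def Claim_equal_enumerate_and_count_safe : Prop := ∀ (graph : List (String × List String)) (start : String) (end_ : String) (required : List String) (path_print_limit : Int) (print_paths : Bool), Dom_enumerate_and_count_safe graph start end_ required path_print_limit print_paths → Spec_enumerate_and_count_safe graph start end_ required path_print_limit print_paths (enumerate_and_count_safe graph start end_ required path_print_limit print_paths)

-- ===== LEMMAS AND PROOFS =====

-- proof-side: sequential processing of a list of ready-made states by pvDfsB
def pvRun (g : PySem.Dict String (List String)) (end_ : String) (required : List String)
    (path_print_limit : Int) (print_paths : Bool) :
    Nat → List PVState → PVAcc → Nat × PVAcc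
  | f, [], acc => (f, acc)
  | f, st :: rest, acc =>
    let x := pvDfsB g end_ required path_print_limit print_paths f st acc
    pvRun g end_ required path_print_limit print_paths x.1.1 rest x.1.2

theorem pvLoopA_nil (g : PySem.Dict String (List String)) (e : String) (r : List String)
    (l : Int) (p : Bool) (f : Nat) (acc : PVAcc) : pvLoopA g e r l p f [] acc = acc := by
  cases f <;> simp [pvLoopA]

theorem pvRun_zero (g : PySem.Dict String (List String)) (e : String) (r : List String)
    (l : Int) (p : Bool) (sts : List PVState) (acc : PVAcc) :
    pvRun g e r l p 0 sts acc = (0, acc) := by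
  induction sts with
  | nil => rfl
  | cons st rest ih =>
      obtain ⟨n, pa, vi, rq⟩ := st
      simp [pvRun, pvDfsB, ih]

theorem pvRun_le (g : PySem.Dict String (List String)) (e : String) (r : List String)
    (l : Int) (p : Bool) (sts : List PVState) :
    ∀ (f : Nat) (acc : PVAcc), (pvRun g e r l p f sts acc).1 ≤ f := by
  induction sts with
  | nil => intro f acc; simp [pvRun]
  | cons st rest ih =>
      intro f acc
      simp only [pvRun]
      exact Nat.le_trans (ih _ _) (pvDfsB g e r l p f st acc).2

theorem pvFoldl_push {α β : Type} (p : α → Bool) (mk : α → β) :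
    ∀ (l : List α) (s : List β),
      l.foldl (fun s x => if p x then s else mk x :: s) s
        = ((l.filter (fun x => !p x)).reverse.map mk) ++ s := by
  intro l
  induction l with
  | nil => intro s; simp
  | cons x xs ih =>
      intro s
      by_cases hx : p x = true <;> simp [List.foldl_cons, hx, ih]

theorem pvSet_union_singleton (s : PySem.Set String) (x : String) :
    PySem.Set.union s [x] = PySem.Set.add s x := rfl

theorem pvGo_eq_run (g : PySem.Dict String (List String)) (e : String) (r : List String)
    (li : Int) (p : Bool) (path : List String) (visited req_seen : PySem.Set String) :
    ∀ (l : List String) (f : Nat) (acc : PVAcc),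
      (pvDfsGo g e r li p f l path visited req_seen acc).1 =
        pvRun g e r li p f
          ((l.filter (fun x => !PySem.Set.contains visited x)).map
            (fun nxt => (nxt, path ++ [nxt], PySem.Set.add visited nxt,
              if r.contains nxt then PySem.Set.add req_seen nxt else req_seen))) acc := by
  intro l
  induction l with
  | nil => intro f acc; simp [pvDfsGo, pvRun]
  | cons x xs ih =>
      intro f acc
      by_cases hx : x ∈ visited
      · simp [pvDfsGo, hx, ih]
      · simp [pvDfsGo, hx, ih, pvRun, pvSet_union_singleton]

theorem pvLoop_run (g : PySem.Dict String (List String)) (e : String) (r : List String)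
    (li : Int) (p : Bool) :
    ∀ (f : Nat) (sts stack : List PVState) (acc : PVAcc),
      pvLoopA g e r li p f (sts ++ stack) acc =
        pvLoopA g e r li p (pvRun g e r li p f sts acc).1 stack (pvRun g e r li p f sts acc).2 := by
  intro f
  induction f using Nat.strong_induction_on with
  | _ f ih =>
    intro sts stack acc
    match f, sts with
    | f, [] => simp [pvRun]
    | 0, st :: rest =>
        rw [pvRun_zero]
        rfl
    | f + 1, (node, path, visited, req_seen) :: rest =>
        obtain ⟨total, qual⟩ := acc
        by_cases hn : (node == e) = true
        · have hq :
            (if PySem.Set.issuperset req_seen r then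
              if p && decide ((qual.length : Int) < li) then qual ++ [path] else qual
             else qual)
            = (if PySem.Set.issuperset req_seen r && p && decide ((qual.length : Int) < li)
               then qual ++ [path] else qual) := by
            by_cases h1 : PySem.Set.issuperset req_seen r = true <;>
              by_cases h2 : p = true <;>
              by_cases h3 : decide ((qual.length : Int) < li) = true <;>
              simp [h1, h2, h3]
          simp only [List.cons_append, pvLoopA, hn, if_true, pvRun, pvDfsB, hq]
          exact ih f (Nat.lt_succ_self f) rest stack _
        · simp only [List.cons_append, pvLoopA, hn, Bool.false_eq_true, if_false, pvRun,
            pvDfsB, pvFoldl_push]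
          rw [pvGo_eq_run]
          set C : List PVState :=
            (((g.getD node []).reverse.filter (fun x => !PySem.Set.contains visited x)).map
              (fun nxt => (nxt, path ++ [nxt], PySem.Set.add visited nxt,
                if r.contains nxt then PySem.Set.add req_seen nxt else req_seen))) with hC
          have hCrev :
              (((g.getD node []).filter (fun x => !PySem.Set.contains visited x)).reverse.map
                (fun nxt => (nxt, path ++ [nxt], PySem.Set.add visited nxt,
                  if r.contains nxt then PySem.Set.add req_seen nxt else req_seen))) = C := by
            rw [hC, List.filter_reverse]
          rw [hCrev, ih f (Nat.lt_succ_self f) C (rest ++ stack) (total, qual),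
            ih (pvRun g e r li p f C (total, qual)).1
              (Nat.lt_succ_of_le (pvRun_le g e r li p C f (total, qual))) rest stack
              (pvRun g e r li p f C (total, qual)).2]

-- ===== VERDICT (by name: the statement is the Claim_ definition above) =====
theorem enumerate_and_count_safe_spec : Claim_equal_enumerate_and_count_safe := by
  intro graph start end_ required path_print_limit print_paths _
  unfold Spec_enumerate_and_count_safe enumerate_and_count_safe enumerate_and_count_safe_alt
  rw [show ([((start, [start], PySem.Set.ofList [start],
      if required.contains start then PySem.Set.ofList [start] else PySem.Set.empty) : PVState)])
    = [((start, [start], PySem.Set.ofList [start],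
      if required.contains start then PySem.Set.ofList [start] else PySem.Set.empty) : PVState)] ++ [] from by simp]
  rw [pvLoop_run, pvLoopA_nil]
  simp [pvRun]
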